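-- pv_equiv track=rewrite | github.com/rashadulrakib/short-text-stream-clustering | OnlineClustering/cgm6/4_Ngram-Clustering_semantic.py | aggregateTextIds
-- ===== SOURCE A (Python) =====
-- def aggregateTextIds(sortedGrams, dic_ngram__txtIds):
--   txtIds=[]
--   for sortGram in sortedGrams:
--     if sortGram not in dic_ngram__txtIds:
--       continue
--     txtIds.extend(dic_ngram__txtIds[sortGram])
--
--   txtIds=set(txtIds)
--
--   return txtIds
-- ===== SOURCE B (Python) =====
-- def aggregateTextIds(sortedGrams, dic_ngram__txtIds):
--     # Divide and conquer: recursively split the index range, union the two halves' sets.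
--     def solve(lo, hi):
--         if hi - lo == 1:
--             return set(dic_ngram__txtIds.get(sortedGrams[lo], []))
--         mid = (lo + hi) // 2
--         return solve(lo, mid) | solve(mid, hi)
--     if not sortedGrams:
--         return set()
--     return solve(0, len(sortedGrams))
-- ===== Notes on version B (the rewrite author's own statement) =====
-- stated objective: alternative
-- what changed: B replaces A's single linear scan with a list accumulator, membership guard and final set() conversion by a recursive divide-and-conquer over the index range of sortedGrams, unioning the sets of the two halves.
import Mathlib
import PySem

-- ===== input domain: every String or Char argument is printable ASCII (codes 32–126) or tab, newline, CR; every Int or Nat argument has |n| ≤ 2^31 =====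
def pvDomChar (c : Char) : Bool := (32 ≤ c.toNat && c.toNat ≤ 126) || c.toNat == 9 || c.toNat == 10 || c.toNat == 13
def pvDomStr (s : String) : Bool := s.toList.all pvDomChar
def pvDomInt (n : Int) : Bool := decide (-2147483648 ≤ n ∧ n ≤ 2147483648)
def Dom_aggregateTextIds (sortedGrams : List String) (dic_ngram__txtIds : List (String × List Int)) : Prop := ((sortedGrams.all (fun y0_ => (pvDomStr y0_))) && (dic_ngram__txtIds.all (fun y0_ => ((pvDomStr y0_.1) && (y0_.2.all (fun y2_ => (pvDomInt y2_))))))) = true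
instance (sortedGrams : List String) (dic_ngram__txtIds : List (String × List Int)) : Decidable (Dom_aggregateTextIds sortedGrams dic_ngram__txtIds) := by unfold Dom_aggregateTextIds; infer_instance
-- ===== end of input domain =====

-- B replaces A's linear scan with a list accumulator by a divide-and-conquer over the index range, unioning halves (objective: alternative).

-- ===== PORT A =====
def aggregateTextIds (sortedGrams : List String) (dic_ngram__txtIds : List (String × List Int)) : List Int :=
  let txtIds : List Int :=
    sortedGrams.foldl (fun acc sortGram =>
      if (PySem.Dict.mk dic_ngram__txtIds).contains sortGram = false then acc  -- 'if sortGram not in …: continue'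
      else acc ++ (PySem.Dict.mk dic_ngram__txtIds).getD sortGram []           -- txtIds.extend(dic[sortGram]) (key present)
      ) []
  PySem.Set.ofList txtIds

-- ===== PORT B =====
-- 'solve(lo, hi)' of Source B; lo < hi ≤ len(sortedGrams) at every call, so sortedGrams[lo] never raises
-- (pyGetD with default "" is exact there) and the 'hi ≤ lo' branch is only a totality guard, never reached.
def pvSolve (sortedGrams : List String) (dic_ngram__txtIds : List (String × List Int)) (lo hi : Nat) : List Int :=
  if _h : hi ≤ lo then []  -- totality guard (unreachable: solve is only called with lo < hi)
  else if _h1 : hi - lo = 1 then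
    PySem.Set.ofList ((PySem.Dict.mk dic_ngram__txtIds).getD (PySem.List.pyGetD sortedGrams (lo : Int) "") [])
  else
    let mid := (lo + hi) / 2
    PySem.Set.union (pvSolve sortedGrams dic_ngram__txtIds lo mid) (pvSolve sortedGrams dic_ngram__txtIds mid hi)
  termination_by hi - lo
  decreasing_by all_goals omega

def aggregateTextIds_alt (sortedGrams : List String) (dic_ngram__txtIds : List (String × List Int)) : List Int :=
  if sortedGrams = [] then PySem.Set.empty
  else pvSolve sortedGrams dic_ngram__txtIds 0 sortedGrams.length

-- ===== PRECONDITION & SPEC =====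
def Spec_aggregateTextIds (sortedGrams : List String) (dic_ngram__txtIds : List (String × List Int)) (out : List Int) : Prop := out = aggregateTextIds_alt sortedGrams dic_ngram__txtIds
instance (sortedGrams : List String) (dic_ngram__txtIds : List (String × List Int)) (out : List Int) : Decidable (Spec_aggregateTextIds sortedGrams dic_ngram__txtIds out) := by unfold Spec_aggregateTextIds; infer_instance

-- ===== CLAIM (what is proved, stated in full; the proofs are below) =====
def Claim_equal_aggregateTextIds : Prop := ∀ (sortedGrams : List String) (dic_ngram__txtIds : List (String × List Int)), Dom_aggregateTextIds sortedGrams dic_ngram__txtIds → Spec_aggregateTextIds sortedGrams dic_ngram__txtIds (aggregateTextIds sortedGrams dic_ngram__txtIds)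

-- ===== LEMMAS AND PROOFS =====

-- the ids contributed by the grams of l, concatenated in order
def pvFlat (dic : List (String × List Int)) (l : List String) : List Int :=
  l.flatMap (fun g => (PySem.Dict.mk dic).getD g [])

-- A's loop builds exactly pvFlat (a missing key contributes getD = [])
theorem pv_foldA (dic : List (String × List Int)) (sg : List String) (acc : List Int) :
    sg.foldl (fun acc g =>
      if (PySem.Dict.mk dic).contains g = false then acc
      else acc ++ (PySem.Dict.mk dic).getD g []) acc = acc ++ pvFlat dic sg := by
  induction sg generalizing acc with
  | nil => simp [pvFlat]
  | cons g t ih =>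
    simp only [List.foldl_cons, pvFlat, List.flatMap_cons]
    by_cases h : (PySem.Dict.mk dic).contains g = false
    · have hgd : (PySem.Dict.mk dic).getD g [] = [] := by
        simp [PySem.Dict.getD_of_not_contains, h]
      rw [if_pos h, ih, hgd]
      simp [pvFlat]
    · rw [if_neg h, ih]
      simp [pvFlat]

theorem pv_ofList_append_union (a b : List Int) :
    PySem.Set.ofList (a ++ b) = PySem.Set.union (PySem.Set.ofList a) (PySem.Set.ofList b) := by
  rw [PySem.Set.ofList_append]
  simp only [PySem.Set.union]
  rw [PySem.Set.update_eq_append_filter, PySem.Set.update_eq_append_filter,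
      PySem.Set.ofList_ofList]

-- pvSolve computes set(flat of the index slice [lo, hi))
theorem pv_solve_eq (dic : List (String × List Int)) (sg : List String) (n lo hi : Nat)
    (hn : hi - lo ≤ n) (hlt : lo < hi) (hle : hi ≤ sg.length) :
    pvSolve sg dic lo hi
      = PySem.Set.ofList (pvFlat dic ((List.range' lo (hi - lo)).map (fun i => sg.getD i ""))) := by
  induction n generalizing lo hi with
  | zero => omega
  | succ n ih =>
    rw [pvSolve]
    rw [dif_neg (by omega)]
    by_cases h1 : hi - lo = 1
    · rw [dif_pos h1]
      have : PySem.List.pyGetD sg (lo : Int) "" = sg.getD lo "" := by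
        simp [PySem.List.pyGetD_natCast]
      rw [this, h1]
      simp [pvFlat]
    · rw [dif_neg h1]
      show PySem.Set.union (pvSolve sg dic lo ((lo + hi) / 2)) (pvSolve sg dic ((lo + hi) / 2) hi) = _
      have hmid1 : lo < (lo + hi) / 2 := by omega
      have hmid2 : (lo + hi) / 2 < hi := by omega
      rw [ih lo ((lo + hi) / 2) (by omega) hmid1 (by omega),
          ih ((lo + hi) / 2) hi (by omega) hmid2 hle,
          ← pv_ofList_append_union]
      have hsplit : List.range' lo ((lo + hi) / 2 - lo) ++ List.range' ((lo + hi) / 2) (hi - (lo + hi) / 2)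
          = List.range' lo (hi - lo) := by
        have := @List.range'_append lo ((lo + hi) / 2 - lo) (hi - (lo + hi) / 2) 1
        simp only [Nat.one_mul] at this
        rw [show lo + ((lo + hi) / 2 - lo) = (lo + hi) / 2 by omega] at this
        rw [this, show (lo + hi) / 2 - lo + (hi - (lo + hi) / 2) = hi - lo by omega]
      rw [← hsplit]
      simp [pvFlat, List.flatMap_append]

theorem pv_map_range'_getD (sg : List String) :
    (List.range' 0 sg.length).map (fun i => sg.getD i "") = sg := by
  apply List.ext_getElem
  · simp
  · intro i h1 h2
    rw [List.getElem_map, List.getD_eq_getElem?_getD, List.getElem?_eq_getElem (by simpa using h2)]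
    simp

-- ===== VERDICT (by name: the statement is the Claim_ definition above) =====
theorem aggregateTextIds_spec : Claim_equal_aggregateTextIds := by
  intro sg dic _
  unfold Spec_aggregateTextIds aggregateTextIds aggregateTextIds_alt
  by_cases hsg : sg = []
  · subst hsg; rfl
  · rw [if_neg hsg,
        pv_solve_eq dic sg sg.length 0 sg.length (by omega)
          (by cases sg with | nil => exact absurd rfl hsg | cons a t => simp) (le_refl _)]
    simp only [Nat.sub_zero, pv_map_range'_getD]
    rw [pv_foldA, List.nil_append]
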